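-- pv_equiv track=rewrite | github.com/DAGubanov/centralities_dec_tree | indices_dec_tree/network_generation.py | _binary_string_from_graph6
-- ===== SOURCE A (Python) =====
-- def _binary_string_from_graph6(s):
--     """
--     Decode a binary string from its graph6 representation
--     :param s: a graph6 string
--     :return:
--     """
--     lst = []
--     for i in range(len(s)):
--         o = ord(s[i])
--         if o > 126 or o < 63:
--             raise RuntimeError("String seems corrupt: valid chars are \n" + ''.join(chr(j) for j in range(63, 127)))
--         a = format(o - 63, 'b')
--         lst.append('0'*(6 - len(a)) + a)
--     return "".join(lst)
-- ===== SOURCE B (Python) =====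
-- _CHUNK = 1024
--
-- def _binary_string_from_graph6(s):
--     """
--     Decode a binary string from its graph6 representation
--     :param s: a graph6 string
--     :return:
--     """
--     pieces = []
--     t = s
--     while t:
--         block, t = t[:_CHUNK], t[_CHUNK:]
--         n = 0
--         for c in block:
--             o = ord(c)
--             if o > 126 or o < 63:
--                 raise RuntimeError("String seems corrupt: valid chars are \n" + ''.join(chr(j) for j in range(63, 127)))
--             n = n * 64 + (o - 63)
--         pieces.append(format(n, '0{}b'.format(6 * len(block))))
--     return "".join(pieces)
-- ===== Notes on version B (the rewrite author's own statement) =====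
-- stated objective: alternative
-- what changed: Instead of formatting each character to a zero-padded 6-bit string and joining the per-character pieces, B accumulates each 1024-character block as one base-64 integer (n = n*64 + ord(c)-63) and emits the block's whole bit string with a single zero-padded binary format call, joining the block strings.
import Mathlib
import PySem

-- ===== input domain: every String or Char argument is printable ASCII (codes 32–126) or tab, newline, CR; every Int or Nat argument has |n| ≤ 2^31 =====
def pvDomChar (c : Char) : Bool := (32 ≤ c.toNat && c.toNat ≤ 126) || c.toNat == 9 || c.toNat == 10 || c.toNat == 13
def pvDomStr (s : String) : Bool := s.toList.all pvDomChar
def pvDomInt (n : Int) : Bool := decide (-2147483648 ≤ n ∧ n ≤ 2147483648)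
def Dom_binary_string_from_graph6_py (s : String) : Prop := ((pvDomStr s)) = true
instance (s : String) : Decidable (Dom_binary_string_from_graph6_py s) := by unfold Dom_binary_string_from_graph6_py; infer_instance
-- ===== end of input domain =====

-- B decodes the graph6 string by accumulating one base-64 integer and emitting the
-- whole bit string with a single zero-padded binary conversion (alternative decomposition).


-- ===== PORT A =====

-- format(n, 'b'): binary digits of n, most significant first, '0' for 0 (shared by both
-- Pythons' calls to format with a 'b' spec)
def natToBinAux : Nat → List Char → List Char
  | 0, acc => acc
  | (n+1), acc => natToBinAux ((n+1)/2) ((if (n+1) % 2 == 1 then '1' else '0') :: acc)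
decreasing_by exact Nat.div_lt_self (Nat.succ_pos n) (by omega)

def natToBin (n : Nat) : List Char := if n = 0 then ['0'] else natToBinAux n []

-- literal port of A: per character, range check (Python raises RuntimeError on the
-- failing branch — those inputs are excluded by Pre_), format to binary, left-pad to 6,
-- append to the list; finally "".join.
def binary_string_from_graph6_py (s : String) : String :=
  let lst := s.toList.foldl (fun lst c =>
    let o := c.toNat
    if 126 < o ∨ o < 63 then lst  -- Python: raise RuntimeError (outside Pre_)
    else
      let a := natToBin (o - 63)
      lst ++ [List.replicate (6 - a.length) '0' ++ a]) ([] : List (List Char))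
  String.mk lst.flatten

-- ===== PORT B =====

-- literal port of B: the while loop peels off blocks of 1024 chars; each block is
-- validated and accumulated as one base-64 integer n, emitted with a single
-- zero-padded binary conversion format(n, '0{6*len(block)}b'); pieces are joined.
def chunkB : List Char → List Char
  | [] => []  -- while t: — loop exits
  | c :: cs =>
      let block := (c :: cs).take 1024
      let rest := (c :: cs).drop 1024
      let n := block.foldl (fun n ch =>
        let o := ch.toNat
        if 126 < o ∨ o < 63 then n  -- Python: raise RuntimeError (outside Pre_)
        else n * 64 + (o - 63)) 0
      let a := natToBin n
      (List.replicate (6 * block.length - a.length) '0' ++ a) ++ chunkB rest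
termination_by cs => cs.length
decreasing_by simp

def binary_string_from_graph6_py_alt (s : String) : String :=
  String.mk (chunkB s.toList)

-- ===== PRECONDITION & SPEC =====
-- Pre_ excludes exactly the inputs on which A raises RuntimeError: a character with
-- ord outside [63, 126] (B raises there too).
def Pre_binary_string_from_graph6_py (s : String) : Prop :=
  (s.toList.all fun c => 63 ≤ c.toNat && c.toNat ≤ 126) = true

instance (s : String) : Decidable (Pre_binary_string_from_graph6_py s) := by
  unfold Pre_binary_string_from_graph6_py; infer_instance

def pvWitness_binary_string_from_graph6_py : String := "D?{"

def Spec_binary_string_from_graph6_py (s : String) (out : String) : Prop := out = binary_string_from_graph6_py_alt s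
instance (s : String) (out : String) : Decidable (Spec_binary_string_from_graph6_py s out) := by unfold Spec_binary_string_from_graph6_py; infer_instance

-- ===== CLAIM (what is proved, stated in full; the proofs are below) =====
def Claim_equal_binary_string_from_graph6_py : Prop := ∀ (s : String), Dom_binary_string_from_graph6_py s → Pre_binary_string_from_graph6_py s → Spec_binary_string_from_graph6_py s (binary_string_from_graph6_py s)

-- ===== LEMMAS AND PROOFS =====

-- fixed-width big-endian binary expansion: the common normal form of both outputs
def bitsFix : Nat → Nat → List Char
  | 0, _ => []
  | (k+1), r => bitsFix k (r / 2) ++ [if r % 2 == 1 then '1' else '0']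

lemma natToBinAux_pos (n : Nat) (h : 0 < n) (acc : List Char) :
    natToBinAux n acc = natToBinAux (n / 2) ((if n % 2 == 1 then '1' else '0') :: acc) := by
  cases n with
  | zero => omega
  | succ m => rw [natToBinAux]

lemma natToBinAux_acc (n : Nat) (acc : List Char) :
    natToBinAux n acc = natToBinAux n [] ++ acc := by
  induction n using Nat.strong_induction_on generalizing acc with
  | _ n ih =>
    cases n with
    | zero => simp [natToBinAux]
    | succ m =>
      rw [natToBinAux_pos (m+1) (Nat.succ_pos m), natToBinAux_pos (m+1) (Nat.succ_pos m) []]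
      rw [ih ((m+1)/2) (Nat.div_lt_self (Nat.succ_pos m) (by omega)),
          ih ((m+1)/2) (Nat.div_lt_self (Nat.succ_pos m) (by omega))
            ([if (m+1) % 2 == 1 then '1' else '0'])]
      simp

lemma natToBin_step (r : Nat) (h : 2 ≤ r) :
    natToBin r = natToBin (r / 2) ++ [if r % 2 == 1 then '1' else '0'] := by
  unfold natToBin
  rw [if_neg (by omega), if_neg (by omega)]
  rw [natToBinAux_pos r (by omega), natToBinAux_acc]

lemma natToBin_zero : natToBin 0 = ['0'] := by simp [natToBin]

lemma natToBin_one : natToBin 1 = ['1'] := by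
  unfold natToBin
  rw [if_neg one_ne_zero, natToBinAux_pos 1 one_pos]
  simp [natToBinAux]

lemma bitsFix_zero (k : Nat) : bitsFix k 0 = List.replicate k '0' := by
  induction k with
  | zero => rfl
  | succ k ih => rw [bitsFix]; simp [ih, List.replicate_succ']

-- a number below 2^(k+1), padded with zeros to width k+1, is its fixed-width expansion
lemma padBin_eq_bitsFix (k : Nat) : ∀ r, r < 2^(k+1) →
    List.replicate ((k+1) - (natToBin r).length) '0' ++ natToBin r = bitsFix (k+1) r := by
  induction k with
  | zero =>
    intro r hr
    interval_cases r <;> simp [natToBin_zero, natToBin_one, bitsFix]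
  | succ k ih =>
    intro r hr
    by_cases h2 : r ≤ 1
    · have hbin : natToBin r = [if r % 2 == 1 then '1' else '0'] := by
        interval_cases r
        · simp [natToBin_zero]
        · simp [natToBin_one]
      have hdiv : r / 2 = 0 := by omega
      rw [bitsFix, hdiv, bitsFix_zero, hbin]
      simp [List.replicate_succ']
    · have hstep := natToBin_step r (by omega)
      have hlen : (natToBin r).length = (natToBin (r / 2)).length + 1 := by
        rw [hstep]; simp
      have hr2 : r / 2 < 2^(k+1) := by
        have : 2^(k+1+1) = 2^(k+1) * 2 := by ring
        omega
      have ihr := ih (r / 2) hr2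
      rw [bitsFix, hlen, hstep]
      have hsub : (k+1+1) - ((natToBin (r / 2)).length + 1) = (k+1) - (natToBin (r / 2)).length := by
        omega
      rw [hsub, ← ihr]
      simp

-- splitting a fixed-width expansion: the top w bits and the bottom k bits
lemma bitsFix_split (k : Nat) : ∀ (w v r : Nat), r < 2^k →
    bitsFix (w + k) (v * 2^k + r) = bitsFix w v ++ bitsFix k r := by
  induction k with
  | zero =>
    intro w v r hr
    have : r = 0 := by omega
    subst this
    simp [bitsFix]
  | succ k ih =>
    intro w v r hr
    have hadd : w + (k+1) = (w + k) + 1 := by omega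
    rw [hadd, bitsFix]
    have hdiv : (v * 2^(k+1) + r) / 2 = v * 2^k + r / 2 := by
      have : v * 2^(k+1) = (v * 2^k) * 2 := by ring
      omega
    have hmod : (v * 2^(k+1) + r) % 2 = r % 2 := by
      have : v * 2^(k+1) = (v * 2^k) * 2 := by ring
      omega
    have hr2 : r / 2 < 2^k := by omega
    rw [hdiv, hmod, ih w v (r / 2) hr2, bitsFix]
    simp

-- the clean base-64 accumulator (the B fold once the in-range checks are discharged)
def accB (cs : List Char) (n : Nat) : Nat :=
  cs.foldl (fun n c => n * 64 + (c.toNat - 63)) n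

lemma accB_bound (cs : List Char) : ∀ n, (∀ c ∈ cs, c.toNat ≤ 126) →
    accB cs n < (n + 1) * 2^(6 * cs.length) := by
  induction cs with
  | nil => intro n _; simp [accB]
  | cons c cs ih =>
    intro n h
    have hc : c.toNat - 63 ≤ 63 := by
      have := h c (by simp); omega
    have := ih (n * 64 + (c.toNat - 63)) (fun x hx => h x (by simp [hx]))
    have hpow : 2^(6 * (cs.length + 1)) = 2^(6 * cs.length) * 64 := by
      rw [show 6 * (cs.length + 1) = 6 * cs.length + 6 by ring, pow_add]; norm_num
    have hle : (n * 64 + (c.toNat - 63) + 1) * 2^(6 * cs.length) ≤ (n + 1) * (2^(6 * cs.length) * 64) := by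
      nlinarith [Nat.two_pow_pos (6 * cs.length)]
    calc accB (c :: cs) n = accB cs (n * 64 + (c.toNat - 63)) := by simp [accB]
      _ < (n * 64 + (c.toNat - 63) + 1) * 2^(6 * cs.length) := this
      _ ≤ (n + 1) * 2^(6 * (cs.length + 1)) := by rw [hpow]; exact hle

-- the expansion of the accumulated integer is the concatenation of the per-char expansions
lemma bitsFix_accB (cs : List Char) : ∀ (w n : Nat), n < 2^w → (∀ c ∈ cs, c.toNat ≤ 126) →
    bitsFix (w + 6 * cs.length) (accB cs n) =
      bitsFix w n ++ (cs.map (fun c => bitsFix 6 (c.toNat - 63))).flatten := by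
  induction cs with
  | nil => intro w n _ _; simp [accB]
  | cons c cs ih =>
    intro w n hn h
    have hd : c.toNat - 63 < 64 := by have := h c (by simp); omega
    have hn' : n * 64 + (c.toNat - 63) < 2^(w + 6) := by
      have : 2^(w+6) = 2^w * 64 := by rw [pow_add]; norm_num
      omega
    have harith : w + 6 * (cs.length + 1) = (w + 6) + 6 * cs.length := by ring
    have hstep : accB (c :: cs) n = accB cs (n * 64 + (c.toNat - 63)) := by simp [accB]
    rw [List.length_cons, harith, hstep,
        ih (w + 6) (n * 64 + (c.toNat - 63)) hn' (fun x hx => h x (by simp [hx]))]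
    have hsplit : bitsFix (w + 6) (n * 64 + (c.toNat - 63)) = bitsFix w n ++ bitsFix 6 (c.toNat - 63) := by
      have := bitsFix_split 6 w n (c.toNat - 63) (by omega)
      simpa using this
    rw [hsplit]
    simp

-- the A fold, checks discharged, is the list of padded per-char strings
lemma foldA_eq (cs : List Char) : ∀ (acc : List (List Char)),
    (∀ c ∈ cs, 63 ≤ c.toNat ∧ c.toNat ≤ 126) →
    cs.foldl (fun lst c =>
      let o := c.toNat
      if 126 < o ∨ o < 63 then lst
      else
        let a := natToBin (o - 63)
        lst ++ [List.replicate (6 - a.length) '0' ++ a]) acc =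
    acc ++ cs.map (fun c =>
      List.replicate (6 - (natToBin (c.toNat - 63)).length) '0' ++ natToBin (c.toNat - 63)) := by
  induction cs with
  | nil => intro acc _; simp
  | cons c cs ih =>
    intro acc h
    have hc := h c (by simp)
    simp only [List.foldl_cons, List.map_cons]
    rw [if_neg (by omega), ih _ (fun x hx => h x (by simp [hx]))]
    simp

-- the B per-block fold, checks discharged, is accB
lemma foldB_eq (cs : List Char) : ∀ (n : Nat),
    (∀ c ∈ cs, 63 ≤ c.toNat ∧ c.toNat ≤ 126) →
    cs.foldl (fun n c =>
      let o := c.toNat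
      if 126 < o ∨ o < 63 then n
      else n * 64 + (o - 63)) n = accB cs n := by
  induction cs with
  | nil => intro n _; simp [accB]
  | cons c cs ih =>
    intro n h
    have hc := h c (by simp)
    simp only [List.foldl_cons]
    rw [if_neg (by omega), ih _ (fun x hx => h x (by simp [hx]))]
    simp [accB]

-- per-char padded string equals the 6-bit fixed-width expansion
lemma pad6_eq (c : Char) (h : 63 ≤ c.toNat ∧ c.toNat ≤ 126) :
    List.replicate (6 - (natToBin (c.toNat - 63)).length) '0' ++ natToBin (c.toNat - 63) =
    bitsFix 6 (c.toNat - 63) := by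
  exact padBin_eq_bitsFix 5 (c.toNat - 63) (by omega)

-- one nonempty block: padded format of the accumulated integer = concatenated 6-bit expansions
lemma block_eq (b : List Char) (hne : b ≠ [])
    (h : ∀ c ∈ b, 63 ≤ c.toNat ∧ c.toNat ≤ 126) :
    List.replicate (6 * b.length - (natToBin (accB b 0)).length) '0' ++ natToBin (accB b 0) =
      (b.map (fun c => bitsFix 6 (c.toNat - 63))).flatten := by
  have hbound : accB b 0 < 2^(6 * b.length) := by
    have := accB_bound b 0 (fun c hc => (h c hc).2)
    simpa using this
  have hlen : 1 ≤ 6 * b.length := by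
    have : b.length ≠ 0 := fun h0 => hne (List.eq_nil_of_length_eq_zero h0)
    omega
  have hk : 6 * b.length = (6 * b.length - 1) + 1 := by omega
  have hpad : List.replicate (6 * b.length - (natToBin (accB b 0)).length) '0' ++
      natToBin (accB b 0) = bitsFix (6 * b.length) (accB b 0) := by
    rw [hk]
    exact padBin_eq_bitsFix (6 * b.length - 1) (accB b 0) (by rw [← hk]; exact hbound)
  rw [hpad]
  have hflat := bitsFix_accB b 0 0 (by norm_num) (fun c hc => (h c hc).2)
  simp only [Nat.zero_add] at hflat
  rw [hflat]
  simp [bitsFix]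

-- the chunked B loop produces the concatenated 6-bit expansions of all characters
lemma chunkB_eq : ∀ (n : Nat) (cs : List Char), cs.length ≤ n →
    (∀ c ∈ cs, 63 ≤ c.toNat ∧ c.toNat ≤ 126) →
    chunkB cs = (cs.map (fun c => bitsFix 6 (c.toNat - 63))).flatten := by
  intro n
  induction n with
  | zero =>
    intro cs hlen _
    have : cs = [] := List.eq_nil_of_length_eq_zero (by omega)
    subst this
    rw [chunkB.eq_def]
    simp
  | succ n ih =>
    intro cs hlen h
    cases cs with
    | nil => rw [chunkB.eq_def]; simp
    | cons c cs' =>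
      rw [chunkB.eq_def]
      simp only
      have hsplit : (c :: cs').take 1024 ++ (c :: cs').drop 1024 = c :: cs' :=
        List.take_append_drop _ _
      have hb : ∀ x ∈ (c :: cs').take 1024, 63 ≤ x.toNat ∧ x.toNat ≤ 126 :=
        fun x hx => h x (List.take_subset _ _ hx)
      have hr : ∀ x ∈ (c :: cs').drop 1024, 63 ≤ x.toNat ∧ x.toNat ≤ 126 :=
        fun x hx => h x (List.drop_subset _ _ hx)
      have hbne : (c :: cs').take 1024 ≠ [] := by
        intro h0
        have := congrArg List.length h0
        simp at this
      have hrlen : ((c :: cs').drop 1024).length ≤ n := by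
        simp only [List.length_drop, List.length_cons] at *
        omega
      rw [foldB_eq _ 0 hb, block_eq _ hbne hb, ih _ hrlen hr,
          ← List.flatten_append, ← List.map_append, hsplit]

-- ===== VERDICT (by name: the statement is the Claim_ definition above) =====
theorem binary_string_from_graph6_py_spec : Claim_equal_binary_string_from_graph6_py := by
  intro s _ hpre0
  unfold Pre_binary_string_from_graph6_py at hpre0
  have hpre : ∀ c ∈ s.toList, 63 ≤ c.toNat ∧ c.toNat ≤ 126 := by
    simp only [List.all_eq_true, Bool.and_eq_true, decide_eq_true_eq] at hpre0
    exact hpre0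
  unfold Spec_binary_string_from_graph6_py binary_string_from_graph6_py binary_string_from_graph6_py_alt
  simp only
  rw [foldA_eq s.toList [] hpre, chunkB_eq s.toList.length s.toList le_rfl hpre,
      List.nil_append]
  have hmap : (s.toList.map (fun c =>
      List.replicate (6 - (natToBin (c.toNat - 63)).length) '0' ++ natToBin (c.toNat - 63))) =
      s.toList.map (fun c => bitsFix 6 (c.toNat - 63)) :=
    List.map_congr_left (fun c hc => pad6_eq c (hpre c hc))
  rw [hmap]
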